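-- pv_equiv track=rewrite | github.com/belenes/parser | avigliano_lexer_v3.py | a_MenorIgual
-- ===== SOURCE A (Python) =====
-- def a_MenorIgual(src):
--     s = 1
--     for c in src:
--         if s == 1 and c == '<':
--             s = 2
--         elif s == 2 and c == '=':
--             s = 3
--         else:
--             s = -1
--             break
--     return s == 3
-- ===== SOURCE B (Python) =====
-- def a_MenorIgual(src):
--     return src == '<='
-- ===== Notes on version B (the rewrite author's own statement) =====
-- stated objective: simpler
-- what changed: Replaced the per-character state machine (states 1/2/3/-1 with break) by a single closed-form string equality test against '<='.
import Mathlib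
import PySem

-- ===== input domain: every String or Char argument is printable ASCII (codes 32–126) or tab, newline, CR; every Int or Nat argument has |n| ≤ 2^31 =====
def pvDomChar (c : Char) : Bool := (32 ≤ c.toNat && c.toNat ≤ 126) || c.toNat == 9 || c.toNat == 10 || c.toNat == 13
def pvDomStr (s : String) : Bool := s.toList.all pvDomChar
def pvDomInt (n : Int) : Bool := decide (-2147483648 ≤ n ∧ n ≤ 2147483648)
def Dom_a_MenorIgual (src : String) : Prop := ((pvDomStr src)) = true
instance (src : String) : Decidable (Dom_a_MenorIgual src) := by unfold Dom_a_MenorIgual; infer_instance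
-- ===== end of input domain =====

-- ===== PORT A =====
-- loop with break: recursion over the characters, same state updates as A
def pvALoop_a_MenorIgual : Int → List Char → Int
  | s, [] => s
  | s, c :: rest =>
    if s == 1 && c == '<' then pvALoop_a_MenorIgual 2 rest
    else if s == 2 && c == '=' then pvALoop_a_MenorIgual 3 rest
    else -1  -- break

def a_MenorIgual (src : String) : Bool :=
  pvALoop_a_MenorIgual 1 src.toList == 3

-- ===== PORT B =====
def a_MenorIgual_alt (src : String) : Bool := src == "<="

-- ===== PRECONDITION & SPEC =====
def Spec_a_MenorIgual (src : String) (out : Bool) : Prop := out = a_MenorIgual_alt src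
instance (src : String) (out : Bool) : Decidable (Spec_a_MenorIgual src out) := by unfold Spec_a_MenorIgual; infer_instance

-- ===== CLAIM (what is proved, stated in full; the proofs are below) =====
def Claim_equal_a_MenorIgual : Prop := ∀ (src : String), Dom_a_MenorIgual src → Spec_a_MenorIgual src (a_MenorIgual src)

-- ===== LEMMAS AND PROOFS =====

-- ===== VERDICT (by name: the statement is the Claim_ definition above) =====
lemma pvALoop_char : ∀ (l : List Char),
    (pvALoop_a_MenorIgual 1 l == 3) = (l == ['<', '=']) := by
  intro l
  match l with
  | [] => decide
  | [c] =>
    simp only [pvALoop_a_MenorIgual]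
    by_cases h : c = '<' <;> simp [h]
  | c :: d :: rest =>
    simp only [pvALoop_a_MenorIgual]
    by_cases h : c = '<'
    · by_cases h2 : d = '='
      · cases rest with
        | nil => simp [h, h2, pvALoop_a_MenorIgual]
        | cons e r => simp [h, h2, pvALoop_a_MenorIgual]
      · simp [h, h2]
    · simp [h]

theorem a_MenorIgual_spec : Claim_equal_a_MenorIgual := by
  intro src _
  unfold Spec_a_MenorIgual a_MenorIgual a_MenorIgual_alt
  rw [pvALoop_char]
  rcases src with ⟨l⟩
  simp [String.ext_iff]
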